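-- pv_equiv track=rewrite | github.com/yiiilonggg/LeetCode | 2731. Movement of Robots/Solution.py | sumDistance
-- ===== SOURCE A (Python) =====
-- from typing import List
--
-- def sumDistance(nums: List[int], s: str, d: int) -> int:
--     n, MOD, res = len(s), 1000000007, 0
--     a = sorted([nums[i] + d if s[i] == 'R' else nums[i] - d for i in range(n)])
--     prev, prefix = a[0], 0
--     for i in range(1, n):
--         res = (res + prefix + i * abs(a[i] - prev)) % MOD
--         prefix = (prefix + i * abs(a[i] - prev)) % MOD
--         prev = a[i]
--     return res
-- ===== SOURCE B (Python) =====
-- def sumDistance(nums, s, d):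
--     MOD = 1000000007
--     a = sorted((x + d) if c == 'R' else (x - d) for x, c in zip(nums, s))
--     n = len(a)
--     return sum((2 * i - n + 1) * v for i, v in enumerate(a)) % MOD
-- ===== Notes on version B (the rewrite author's own statement) =====
-- stated objective: simpler
-- what changed: Replaces A's stateful adjacent-gap accumulation (prev/prefix/res updated with abs differences and a mod at every step) by the closed-form coefficient formula sum of (2*i-n+1)*a[i] over the sorted moved positions, computed as one exact weighted sum with a single final mod.
import Mathlib
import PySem

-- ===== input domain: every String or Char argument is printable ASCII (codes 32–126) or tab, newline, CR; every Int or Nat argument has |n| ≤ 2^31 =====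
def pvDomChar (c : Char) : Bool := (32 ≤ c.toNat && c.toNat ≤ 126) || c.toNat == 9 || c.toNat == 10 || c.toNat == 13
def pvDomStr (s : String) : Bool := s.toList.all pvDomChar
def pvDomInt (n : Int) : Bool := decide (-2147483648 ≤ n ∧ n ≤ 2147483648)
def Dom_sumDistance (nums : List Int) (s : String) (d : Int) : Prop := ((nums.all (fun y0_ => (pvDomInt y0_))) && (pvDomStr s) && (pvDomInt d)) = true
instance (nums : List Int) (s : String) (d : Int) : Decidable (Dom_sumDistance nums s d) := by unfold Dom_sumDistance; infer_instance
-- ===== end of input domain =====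

-- B replaces A's stateful adjacent-gap accumulator by the closed-form coefficient sum
-- Σ_i (2i−n+1)·a[i] over the sorted moved positions, with one final mod; objective: simpler.


-- ===== PORT A =====
def sumDistance (nums : List Int) (s : String) (d : Int) : Int :=
  let n : Int := PySem.Str.len s
  let M : Int := 1000000007
  let a : List Int := PySem.List.sorted
    ((PySem.List.pyRange 0 n 1).map (fun i =>
      if PySem.Str.pyGet? s i = some 'R'
      then PySem.List.pyGetD nums i 0 + d
      else PySem.List.pyGetD nums i 0 - d)) (fun x => x) false
  -- a[0]: IndexError when a = [] (excluded by Pre_); likewise nums[i] above needs len(s) ≤ len(nums)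
  let st := (PySem.List.pyRange 1 n 1).foldl
    (fun (st : Int × Int × Int) i =>
      (PySem.Int.mod (st.1 + st.2.2 + i * |PySem.List.pyGetD a i 0 - st.2.1|) M,
       PySem.List.pyGetD a i 0,
       PySem.Int.mod (st.2.2 + i * |PySem.List.pyGetD a i 0 - st.2.1|) M))
    (0, PySem.List.pyGetD a 0 0, 0)
  st.1

-- ===== PORT B =====
def sumDistance_alt (nums : List Int) (s : String) (d : Int) : Int :=
  let M : Int := 1000000007
  let a : List Int := PySem.List.sorted
    ((nums.zip s.toList).map (fun p => if p.2 = 'R' then p.1 + d else p.1 - d)) (fun x => x) false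
  let n : Int := a.length
  PySem.Int.mod
    ((PySem.List.enumerate a 0).foldl (fun acc iv => acc + (2 * iv.1 - n + 1) * iv.2) 0) M

-- ===== PRECONDITION & SPEC =====
-- Pre_ excludes exactly the inputs where A raises IndexError: empty s (a[0]) or len(nums) < len(s) (nums[i]).
def Pre_sumDistance (nums : List Int) (s : String) (d : Int) : Prop :=
  s.toList ≠ [] ∧ s.toList.length ≤ nums.length
instance (nums : List Int) (s : String) (d : Int) : Decidable (Pre_sumDistance nums s d) := by unfold Pre_sumDistance; infer_instance
def pvWitness_sumDistance : List Int × String × Int := ([1, -4, 2], "RLR", 3)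

def Spec_sumDistance (nums : List Int) (s : String) (d : Int) (out : Int) : Prop := out = sumDistance_alt nums s d
instance (nums : List Int) (s : String) (d : Int) (out : Int) : Decidable (Spec_sumDistance nums s d out) := by unfold Spec_sumDistance; infer_instance

-- ===== CLAIM (what is proved, stated in full; the proofs are below) =====
def Claim_equal_sumDistance : Prop := ∀ (nums : List Int) (s : String) (d : Int), Dom_sumDistance nums s d → Pre_sumDistance nums s d → Spec_sumDistance nums s d (sumDistance nums s d)

-- ===== LEMMAS AND PROOFS =====

-- A's loop, structurally: state (res, prev, prefix), index carried explicitly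
def loopA : List Int → Int → (Int × Int × Int) → (Int × Int × Int)
  | [], _, st => st
  | v :: t, i, st => loopA t (i + 1)
      (PySem.Int.mod (st.1 + st.2.2 + i * |v - st.2.1|) 1000000007, v,
       PySem.Int.mod (st.2.2 + i * |v - st.2.1|) 1000000007)

-- A's loop with the mods removed (same gaps, exact arithmetic); returns the exact res
def exactA : List Int → Int → Int → Int → Int → Int
  | [], _, _, r, _ => r
  | v :: t, i, prev, r, p => exactA t (i + 1) v (r + p + i * |v - prev|) (p + i * |v - prev|)

theorem mod2_add (x y c : Int) :
    PySem.Int.mod (PySem.Int.mod x 1000000007 + PySem.Int.mod y 1000000007 + c) 1000000007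
      = PySem.Int.mod (x + y + c) 1000000007 := by
  have h : (0:Int) < 1000000007 := by norm_num
  simp only [PySem.Int.mod_eq_emod_of_pos h]
  conv_rhs => rw [Int.add_emod, Int.add_emod x y]
  rw [Int.add_emod, Int.add_emod (x % 1000000007) (y % 1000000007),
      Int.emod_emod_of_dvd _ dvd_rfl, Int.emod_emod_of_dvd _ dvd_rfl]

-- the two comprehensions build the same moved list (under len(s) ≤ len(nums))
theorem lists_eq (nums : List Int) (s : String) (d : Int)
    (h : s.toList.length ≤ nums.length) :
    (PySem.List.pyRange 0 (PySem.Str.len s) 1).map (fun i =>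
      if PySem.Str.pyGet? s i = some 'R'
      then PySem.List.pyGetD nums i 0 + d
      else PySem.List.pyGetD nums i 0 - d)
    = (nums.zip s.toList).map (fun p => if p.2 = 'R' then p.1 + d else p.1 - d) := by
  rw [PySem.Str.len_eq, PySem.List.pyRange_one, List.map_map]
  apply List.ext_getElem
  · simp only [List.length_map, List.length_range, List.length_zip,
      Int.sub_zero, Int.toNat_natCast]
    omega
  · intro k h1 h2
    have hk : k < s.toList.length := by
      simp only [List.length_map, List.length_zip] at h2
      omega
    have hkn : k < nums.length := by omega
    simp [Function.comp, List.getElem_zip, List.getElem?_eq_getElem hk,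
      List.getElem?_eq_getElem hkn, List.getD]

-- A's indexed fold over range(1, len(a)) is loopA on the tail
theorem bridgeA (a : List Int) : ∀ (t pre : List Int), a = pre ++ t →
    ∀ st : Int × Int × Int,
    (PySem.List.pyRange (pre.length : Int) (a.length : Int) 1).foldl
      (fun (st : Int × Int × Int) i =>
        (PySem.Int.mod (st.1 + st.2.2 + i * |PySem.List.pyGetD a i 0 - st.2.1|) 1000000007,
         PySem.List.pyGetD a i 0,
         PySem.Int.mod (st.2.2 + i * |PySem.List.pyGetD a i 0 - st.2.1|) 1000000007)) st
    = loopA t (pre.length : Int) st := by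
  intro t
  induction t with
  | nil =>
    intro pre ha st
    rw [List.append_nil] at ha
    subst ha
    rw [PySem.List.pyRange_one_eq_nil le_rfl]
    rfl
  | cons v t ih =>
    intro pre ha st
    have hlen : (pre.length : Int) < (a.length : Int) := by
      have : pre.length < a.length := by rw [ha]; simp
      exact_mod_cast this
    rw [PySem.List.pyRange_one_cons hlen, List.foldl_cons]
    have hv : PySem.List.pyGetD a (pre.length : Int) 0 = v := by
      rw [PySem.List.pyGetD_natCast, ha, List.getD_eq_getElem?_getD,
        List.getElem?_append_right (by omega)]
      simp
    rw [hv]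
    have H := ih (pre ++ [v]) (by rw [ha]; simp)
      (PySem.Int.mod (st.1 + st.2.2 + (pre.length : Int) * |v - st.2.1|) 1000000007, v,
       PySem.Int.mod (st.2.2 + (pre.length : Int) * |v - st.2.1|) 1000000007)
    have hc : (((pre ++ [v]).length : Nat) : Int) = (pre.length : Int) + 1 := by
      simp
    rw [hc] at H
    exact H.trans (by rfl)

-- the modded loop computes the exact loop's result mod M
theorem loopA_mod : ∀ (t : List Int) (i prev r p : Int),
    (loopA t i (PySem.Int.mod r 1000000007, prev, PySem.Int.mod p 1000000007)).1
      = PySem.Int.mod (exactA t i prev r p) 1000000007 := by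
  intro t
  induction t with
  | nil => intro i prev r p; simp [loopA, exactA]
  | cons v t ih =>
    intro i prev r p
    simp only [loopA, exactA]
    have h1 : PySem.Int.mod (PySem.Int.mod r 1000000007 + PySem.Int.mod p 1000000007
        + i * |v - prev|) 1000000007
        = PySem.Int.mod (r + p + i * |v - prev|) 1000000007 := mod2_add r p _
    have h2 : PySem.Int.mod (PySem.Int.mod p 1000000007 + i * |v - prev|) 1000000007
        = PySem.Int.mod (p + i * |v - prev|) 1000000007 := by
      simpa using mod2_add 0 p (i * |v - prev|)
    rw [h1, h2]
    exact ih (i + 1) v (r + p + i * |v - prev|) (p + i * |v - prev|)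

-- the exact gap loop equals the coefficient sum (sorted input makes the abs vanish)
theorem exactA_eq (n : Int) : ∀ (t : List Int) (i prev r p : Int),
    (prev :: t).Pairwise (· ≤ ·) → n = i + t.length →
    exactA t i prev r p
      = r + (t.length : Int) * p
        + (PySem.List.enumerate t i).foldl (fun acc iv => acc + (2 * iv.1 - n + 1) * iv.2) 0
        - i * (n - i) * prev := by
  intro t
  induction t with
  | nil =>
    intro i prev r p _ hn
    simp only [exactA, PySem.List.enumerate_nil, List.foldl_nil, List.length_nil]
    have hni : n = i := by simp at hn; omega
    subst hni
    ring
  | cons v t ih =>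
    intro i prev r p hp hn
    rw [List.pairwise_cons] at hp
    obtain ⟨hle, hp'⟩ := hp
    have hpv : prev ≤ v := hle v (by simp)
    have habs : |v - prev| = v - prev := abs_of_nonneg (by omega)
    simp only [exactA, habs, PySem.List.enumerate_cons]
    rw [ih (i + 1) v (r + p + i * (v - prev)) (p + i * (v - prev)) hp' (by simp at hn ⊢; omega)]
    -- shift the fold's initial accumulator out: foldl (acc + f) c l = c + foldl (acc + f) 0 l
    rw [List.foldl_cons]
    have hshift : ∀ (l : List (Int × Int)) (c : Int),
        l.foldl (fun acc iv => acc + (2 * iv.1 - n + 1) * iv.2) c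
          = c + l.foldl (fun acc iv => acc + (2 * iv.1 - n + 1) * iv.2) 0 := by
      intro l
      induction l with
      | nil => intro c; simp
      | cons x l ihl => intro c; rw [List.foldl_cons, List.foldl_cons, ihl, ihl (0 + _)]; ring
    rw [hshift _ (0 + (2 * i - n + 1) * v)]
    have hlen : (t.length : Int) = n - i - 1 := by simp at hn; omega
    have hlc : (((v :: t).length : Nat) : Int) = n - i := by simp at hn ⊢; omega
    rw [hlen, hlc]
    ring

-- ===== VERDICT (by name: the statement is the Claim_ definition above) =====
theorem sumDistance_spec : Claim_equal_sumDistance := by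
  intro nums s d _ hpre
  obtain ⟨hne, hlen⟩ := hpre
  unfold Spec_sumDistance sumDistance sumDistance_alt
  simp only []
  rw [lists_eq nums s d hlen]
  set LB := (nums.zip s.toList).map (fun p => if p.2 = 'R' then p.1 + d else p.1 - d) with hLB
  set a := PySem.List.sorted LB (fun x => x) false with ha
  have hlenLB : LB.length = s.toList.length := by
    rw [hLB, List.length_map, List.length_zip]
    omega
  have hlena : a.length = s.toList.length := by
    rw [ha, PySem.List.length_sorted, hlenLB]
  have hn : PySem.Str.len s = (a.length : Int) := by
    rw [PySem.Str.len_eq, hlena]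
  rw [hn]
  obtain ⟨x, t, hxt⟩ : ∃ x t, a = x :: t := by
    cases hc : a with
    | nil => exfalso; apply hne; have := hlena; rw [hc] at this; simpa using this.symm
    | cons x t => exact ⟨x, t, rfl⟩
  have hx0 : PySem.List.pyGetD a 0 0 = x := by rw [hxt]; exact PySem.List.pyGetD_zero_cons _ _ _
  have hA := bridgeA a t [x] (by simpa using hxt) (0, x, 0)
  rw [show ((([x] : List Int).length : Nat) : Int) = 1 from by norm_num] at hA
  have hm0 : PySem.Int.mod 0 1000000007 = (0 : Int) := by decide
  rw [hx0, hA]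
  have hpw : (x :: t).Pairwise (· ≤ ·) := by
    have := PySem.List.sorted_pairwise LB (fun x => x)
    rw [← ha, hxt] at this
    exact this
  have hmodA : (loopA t 1 (0, x, 0)).1
      = PySem.Int.mod (exactA t 1 x 0 0) 1000000007 := by
    have := loopA_mod t 1 x 0 0
    rw [hm0] at this
    exact this
  rw [hmodA]
  set n : Int := (a.length : Int) with hn'
  have hnx : n = 1 + (t.length : Int) := by rw [hn', hxt]; push_cast [List.length_cons]; ring
  rw [exactA_eq n t 1 x 0 0 hpw hnx]
  -- B's fold on a = x :: t peels its head off to the same tail fold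
  rw [hxt, PySem.List.enumerate_cons, List.foldl_cons]
  have hshift : ∀ (l : List (Int × Int)) (c : Int),
      l.foldl (fun acc iv => acc + (2 * iv.1 - n + 1) * iv.2) c
        = c + l.foldl (fun acc iv => acc + (2 * iv.1 - n + 1) * iv.2) 0 := by
    intro l
    induction l with
    | nil => intro c; simp
    | cons y l ihl => intro c; rw [List.foldl_cons, List.foldl_cons, ihl, ihl (0 + _)]; ring
  rw [hshift (PySem.List.enumerate t (0 + 1)) (0 + (2 * 0 - n + 1) * x)]
  simp only [zero_add]
  congr 1
  ring
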